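-- pv_equiv track=rewrite | github.com/TheAlgorithms/Python | cellular_automata/elementary_cellular_automaton.py | rule_30_step
-- ===== SOURCE A (Python) =====
-- def rule_30_step(current: list[int]) -> list[int]:
--     """
--     Compute the next generation of a one-dimensional cellular automaton
--     following Wolfram's Rule 30.
--
--     Each cell's next state is determined by its left, center, and right neighbors.
--
--     Args:
--         current (list[int]): The current generation as a list of 0s (dead)
--             and 1s (alive).
--
--     Returns:
--         list[int]: The next generation as a list of 0s and 1s.
--
--     Example:
--         >>> rule_30_step([0, 0, 1, 0, 0])
--         [0, 1, 1, 1, 0]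
--     """
--     next_gen = []
--     for i in range(len(current)):
--         left = current[i - 1] if i > 0 else 0
--         center = current[i]
--         right = current[i + 1] if i < len(current) - 1 else 0
--
--         # Combine neighbors into a 3-bit pattern
--         pattern = (left << 2) | (center << 1) | right
--
--         # Rule 30 binary: 00011110 (bitwise representation of 30)
--         next_gen.append((30 >> pattern) & 1)
--
--     return next_gen
-- ===== SOURCE B (Python) =====
-- def rule_30_step(current: list[int]) -> list[int]:
--     if not current:
--         return []
--     length = len(current)
--     # one field of w bits per cell: wide enough that left<<2, center<<1, right
--     # never spill into a neighbouring field (fields combine by OR, no carries)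
--     w = max(v.bit_length() for v in current) + 3
--     n = 0
--     for v in current:
--         n = (n << w) | v
--     # align left, center and right neighbours inside every field at once
--     p = (n >> (w - 2)) | (n << 1) | (n << w)
--     mask = (1 << w) - 1
--     return [(30 >> ((p >> (w * (length - 1 - i))) & mask)) & 1 for i in range(length)]
-- ===== Notes on version B (the rewrite author's own statement) =====
-- stated objective: alternative
-- what changed: A scans cell by cell, assembling each 3-bit neighbourhood from indexed lookups and querying the rule table per cell; B packs the whole row into one big integer with a fixed-width field per cell (w = max bit_length + 3), aligns all left/center/right neighbours at once with three shifts and ORs of that integer, and only then reads each field's pattern out; the neighbourhood assembly is done wholesale on one integer instead of per cell.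
import Mathlib
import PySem

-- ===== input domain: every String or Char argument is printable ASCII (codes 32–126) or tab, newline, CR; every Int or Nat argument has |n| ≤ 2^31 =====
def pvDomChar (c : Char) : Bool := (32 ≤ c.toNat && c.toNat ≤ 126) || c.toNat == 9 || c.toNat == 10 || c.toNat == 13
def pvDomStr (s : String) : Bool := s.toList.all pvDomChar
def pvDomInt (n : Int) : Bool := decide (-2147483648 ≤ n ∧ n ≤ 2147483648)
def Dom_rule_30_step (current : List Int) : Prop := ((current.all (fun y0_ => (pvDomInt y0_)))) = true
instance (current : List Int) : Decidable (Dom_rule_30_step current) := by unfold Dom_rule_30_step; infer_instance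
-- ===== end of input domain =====

-- B packs the row into one big integer with one w-bit field per cell (w = max bit_length + 3)
-- and aligns all left/center/right neighbours at once with three shifts/ORs of that integer,
-- instead of A's per-cell indexed neighbourhood assembly; Pre_ excludes rows with a negative
-- cell, on which A raises ValueError (negative shift count in '30 >> pattern').


-- ===== PORT A =====
-- '30 >> pattern' is ported as '>>> pattern.toNat': exact whenever pattern ≥ 0 (inside Pre_
-- it always is; Python raises ValueError on a negative shift count, excluded by Pre_).
def rule_30_step (current : List Int) : List Int :=
  (PySem.List.pyRange 0 (PySem.List.len current) 1).foldl (fun next_gen i =>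
    let left : Int := if i > 0 then PySem.List.pyGetD current (i - 1) 0 else 0
    let center : Int := PySem.List.pyGetD current i 0
    let right : Int := if i < PySem.List.len current - 1 then PySem.List.pyGetD current (i + 1) 0 else 0
    let pattern : Int := PySem.Int.bor (PySem.Int.bor (left <<< (2 : Nat)) (center <<< (1 : Nat))) right
    next_gen ++ [PySem.Int.band ((30 : Int) >>> pattern.toNat) 1]) []

-- ===== PORT B =====
-- max over the nonempty list of bit lengths is ported as foldl max 0 (all values are ≥ 0);
-- the shift counts w - 2, w * (length - 1 - i) and '30 >> pat' are the same natural numbers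
-- Python computes (w ≥ 3, i < length, pat = masked value ≥ 0, ported via .toNat).
def rule_30_step_alt (current : List Int) : List Int :=
  if current = [] then []
  else
    let w : Nat := (current.map (fun v => PySem.Int.bitLength v)).foldl max 0 + 3
    let n : Int := current.foldl (fun m v => PySem.Int.bor (m <<< w) v) 0
    let p : Int := PySem.Int.bor (PySem.Int.bor (n >>> (w - 2)) (n <<< (1 : Nat))) (n <<< w)
    let mask : Int := ((1 : Int) <<< w) - 1
    (List.range current.length).map (fun i =>
      PySem.Int.band ((30 : Int) >>>
        (PySem.Int.band (p >>> (w * (current.length - 1 - i))) mask).toNat) 1)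

-- ===== PRECONDITION & SPEC =====
-- Pre_ excludes exactly the rows containing a negative cell: there Python's '30 >> pattern'
-- in A raises ValueError (negative shift count).
def Pre_rule_30_step (current : List Int) : Prop := ∀ c ∈ current, 0 ≤ c
instance (current : List Int) : Decidable (Pre_rule_30_step current) := by unfold Pre_rule_30_step; infer_instance
def pvWitness_rule_30_step : List Int := [0, 0, 1, 0, 0]

def Spec_rule_30_step (current : List Int) (out : List Int) : Prop := out = rule_30_step_alt current
instance (current : List Int) (out : List Int) : Decidable (Spec_rule_30_step current out) := by unfold Spec_rule_30_step; infer_instance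

-- ===== CLAIM (what is proved, stated in full; the proofs are below) =====
def Claim_equal_rule_30_step : Prop := ∀ (current : List Int), Dom_rule_30_step current → Pre_rule_30_step current → Spec_rule_30_step current (rule_30_step current)

-- ===== LEMMAS AND PROOFS =====

-- cast facts
lemma shiftR_natCast (m k : Nat) : ((m : Int) >>> k) = ((m >>> k : Nat) : Int) := by
  exact_mod_cast rfl

lemma shiftL_natCast (m k : Nat) : ((m : Int) <<< k) = ((m <<< k : Nat) : Int) := by
  exact_mod_cast rfl

lemma one_shiftL_sub_one (p : Nat) : ((1 : Int) <<< p) - 1 = ((2 ^ p - 1 : Nat) : Int) := by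
  have h1 : ((1 : Int) <<< p) = ((1 <<< p : Nat) : Int) := by exact_mod_cast rfl
  rw [h1, Nat.shiftLeft_eq, one_mul]
  have h2 : (1 : Nat) ≤ 2 ^ p := Nat.one_le_two_pow
  push_cast [h2]
  ring

-- the accumulator is at most the fold of max
lemma foldl_max_init (l : List Nat) : ∀ (a : Nat), a ≤ l.foldl max a := by
  induction l with
  | nil => intro a; exact le_refl _
  | cons y l ih => intro a; exact le_trans (le_max_left a y) (ih (max a y))

-- every element is at most the fold of max
lemma le_foldl_max (l : List Nat) : ∀ (a x : Nat), x ∈ l → x ≤ l.foldl max a := by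
  induction l with
  | nil => intro a x hx; cases hx
  | cons y l ih =>
    intro a x hx
    rcases List.mem_cons.mp hx with rfl | hx
    · exact le_trans (le_max_right a x) (foldl_max_init l (max a x))
    · exact ih _ _ hx

-- the Nat-level field packing, mirror of B's fold
def packW (W : Nat) (cs : List Nat) : Nat := cs.foldl (fun m v => (m <<< W) ||| v) 0

lemma packW_append (W : Nat) (cs : List Nat) (v : Nat) :
    packW W (cs ++ [v]) = ((packW W cs) <<< W) ||| v := by
  simp [packW, List.foldl_append]

lemma pack_int' (l : List Int) (W : Nat) : ∀ (m : Nat), (∀ c ∈ l, 0 ≤ c) →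
    l.foldl (fun n v => PySem.Int.bor (n <<< W) v) (m : Int)
      = ((l.foldl (fun n v => (n <<< W) ||| v.toNat) m : Nat) : Int) := by
  induction l with
  | nil => intro m _; rfl
  | cons b l ih =>
    intro m h
    have hb : 0 ≤ b := h b (by simp)
    simp only [List.foldl_cons]
    have step : PySem.Int.bor ((m : Int) <<< W) b = (((m <<< W) ||| b.toNat : Nat) : Int) := by
      rw [shiftL_natCast, show b = ((b.toNat : Nat) : Int) by omega, PySem.Int.bor_natCast,
        Int.toNat_natCast]
    rw [step]
    exact ih _ (fun c hc => h c (by simp [hc]))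

lemma packW_spec (W : Nat) : ∀ (cs : List Nat), (∀ x ∈ cs, x < 2 ^ W) →
    packW W cs < 2 ^ (W * cs.length) ∧
      ∀ k b, b < W → (packW W cs).testBit (W * k + b)
        = (decide (k < cs.length) && (cs.getD (cs.length - 1 - k) 0).testBit b) := by
  intro cs
  induction cs using List.reverseRecOn with
  | nil => intro _; exact ⟨by simp [packW], fun k b _ => by simp [packW]⟩
  | append_singleton cs v ih =>
    intro h
    obtain ⟨ihlt, ihbit⟩ := ih (fun c hc => h c (by simp [hc]))
    have hv : v < 2 ^ W := h v (by simp)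
    have hL : (cs ++ [v]).length = cs.length + 1 := by simp
    rw [packW_append, hL]
    have hexp : W * (cs.length + 1) = W * cs.length + W := by ring
    constructor
    · apply Nat.or_lt_two_pow
      · rw [Nat.shiftLeft_eq, hexp, pow_add]
        have hpos : 0 < 2 ^ W := Nat.two_pow_pos W
        exact Nat.mul_lt_mul_of_lt_of_le ihlt (le_refl _) hpos
      · exact lt_of_lt_of_le hv (Nat.pow_le_pow_right (by omega) (by omega))
    · intro k b hb
      rw [Nat.testBit_or, Nat.testBit_shiftLeft]
      by_cases hk : k = 0
      · subst hk
        have h1 : decide (W ≤ W * 0 + b) = false := by simp; omega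
        have hidx : cs.length + 1 - 1 - 0 = cs.length := by omega
        rw [h1, Bool.false_and, Bool.false_or, hidx,
          List.getD_append_right cs [v] 0 cs.length (le_refl _), Nat.sub_self]
        simp
      · obtain ⟨k', rfl⟩ : ∃ k', k = k' + 1 := ⟨k - 1, by omega⟩
        have hWle : W ≤ W * (k' + 1) + b := by
          have : W * (k' + 1) = W * k' + W := by ring
          omega
        have hsub : W * (k' + 1) + b - W = W * k' + b := by
          have : W * (k' + 1) = W * k' + W := by ring
          omega
        have hvbit : v.testBit (W * (k' + 1) + b) = false := by
          apply Nat.testBit_eq_false_of_lt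
          exact lt_of_lt_of_le hv (Nat.pow_le_pow_right (by omega) (by omega))
        rw [hvbit, Bool.or_false, hsub, ihbit k' b hb,
          show decide (W ≤ W * (k' + 1) + b) = true by simp [hWle], Bool.true_and]
        by_cases hk' : k' < cs.length
        · have hidx : cs.length + 1 - 1 - (k' + 1) = cs.length - 1 - k' := by omega
          rw [hidx, List.getD_append cs [v] 0 _ (by omega)]
          have ht : k' + 1 < cs.length + 1 := by omega
          simp [hk', ht]
        · have ht : ¬ (k' + 1 < cs.length + 1) := by omega
          simp [hk', ht]

-- extracting field i of the neighbour-aligned packed integer yields cell i's 3-bit pattern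
lemma field_eq (W : Nat) (hW : 3 ≤ W) (cs : List Nat)
    (hmem : ∀ x ∈ cs, x < 2 ^ (W - 3)) (i : Nat) (hi : i < cs.length) :
    ((((packW W cs >>> (W - 2)) ||| (packW W cs <<< 1)) ||| (packW W cs <<< W))
        >>> (W * (cs.length - 1 - i))) &&& (2 ^ W - 1)
      = (((if 0 < i then cs.getD (i - 1) 0 else 0) <<< 2) |||
          ((cs.getD i 0) <<< 1)) |||
          (if i + 1 < cs.length then cs.getD (i + 1) 0 else 0) := by
  have hgetD : ∀ k, cs.getD k 0 < 2 ^ (W - 3) := by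
    intro k
    by_cases hk : k < cs.length
    · rw [List.getD_eq_getElem _ _ hk]; exact hmem _ (cs.getElem_mem hk)
    · rw [List.getD_eq_default _ _ (by omega)]; exact Nat.two_pow_pos _
  obtain ⟨hNlt, hNbit⟩ := packW_spec W cs
    (fun x hx => lt_of_lt_of_le (hmem x hx) (Nat.pow_le_pow_right (by omega) (by omega)))
  set L := cs.length with hLdef
  set N := packW W cs with hNdef
  obtain ⟨j, hjdef⟩ : ∃ j, L - 1 - i = j := ⟨_, rfl⟩
  rw [hjdef]
  have hjL : j < L := by omega
  have hij : i = L - 1 - j := by omega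
  -- a cell's bits at offsets ≥ W - 3 are zero
  have hcell : ∀ k b, W - 3 ≤ b → (cs.getD k 0).testBit b = false := by
    intro k b hbW
    apply Nat.testBit_eq_false_of_lt
    exact lt_of_lt_of_le (hgetD k) (Nat.pow_le_pow_right (by omega) hbW)
  apply Nat.eq_of_testBit_eq
  intro b
  simp only [Nat.testBit_and, Nat.testBit_two_pow_sub_one, Nat.testBit_shiftRight,
    Nat.testBit_or, Nat.testBit_shiftLeft, ge_iff_le]
  by_cases hbW : b < W
  · rw [show decide (b < W) = true by simp [hbW], Bool.and_true]
    -- arm 1: the left neighbour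
    have arm1 : N.testBit (W - 2 + (W * j + b))
        = (decide (2 ≤ b) && (if 0 < i then cs.getD (i - 1) 0 else 0).testBit (b - 2)) := by
      by_cases hb2 : 2 ≤ b
      · have hstep : W * (j + 1) = W * j + W := by ring
        have hpos : W - 2 + (W * j + b) = W * (j + 1) + (b - 2) := by omega
        rw [hpos, hNbit (j + 1) (b - 2) (by omega)]
        by_cases h0 : 0 < i
        · have hlt : j + 1 < L := by omega
          rw [show L - 1 - (j + 1) = i - 1 by omega]
          simp [hlt, h0, hb2]
        · have hlt : ¬ (j + 1 < L) := by omega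
          simp [hlt, h0, hb2]
      · have hpos : W - 2 + (W * j + b) = W * j + (W - 2 + b) := by omega
        rw [hpos, hNbit j (W - 2 + b) (by omega)]
        rw [hcell (L - 1 - j) (W - 2 + b) (by omega)]
        simp [hb2]
    -- arm 2: the center cell
    have arm2 : (decide (1 ≤ W * j + b) && N.testBit (W * j + b - 1))
        = (decide (1 ≤ b) && (cs.getD i 0).testBit (b - 1)) := by
      by_cases hb1 : 1 ≤ b
      · have hpos : W * j + b - 1 = W * j + (b - 1) := by omega
        have hge : 1 ≤ W * j + b := by omega
        rw [hpos, hNbit j (b - 1) (by omega), hij]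
        simp [hge, hb1, hjL]
      · have hb0 : b = 0 := by omega
        subst hb0
        by_cases hj0 : 0 < j
        · obtain ⟨t, rfl⟩ : ∃ t, j = t + 1 := ⟨j - 1, by omega⟩
          have hmul : W * (t + 1) = W * t + W := by ring
          have hge : 1 ≤ W * (t + 1) + 0 := by omega
          have hpos : W * (t + 1) + 0 - 1 = W * t + (W - 1) := by omega
          rw [hpos, hNbit t (W - 1) (by omega)]
          rw [hcell (L - 1 - t) (W - 1) (by omega)]
          simp
        · have hj0' : j = 0 := by omega
          subst hj0'
          simp
    -- arm 3: the right neighbour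
    have arm3 : (decide (W ≤ W * j + b) && N.testBit (W * j + b - W))
        = (if i + 1 < L then cs.getD (i + 1) 0 else 0).testBit b := by
      by_cases hj1 : 1 ≤ j
      · obtain ⟨t, rfl⟩ : ∃ t, j = t + 1 := ⟨j - 1, by omega⟩
        have hmul : W * (t + 1) = W * t + W := by ring
        have hge : W ≤ W * (t + 1) + b := by omega
        have hpos : W * (t + 1) + b - W = W * t + b := by omega
        rw [hpos, hNbit t b hbW]
        have h1 : i + 1 < L := by omega
        rw [show L - 1 - t = i + 1 by omega]
        simp [h1, hge, show t < L by omega]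
      · have hj0 : j = 0 := by omega
        subst hj0
        have h1 : ¬ (i + 1 < L) := by omega
        simp [h1]
        intro hWb
        exact absurd hWb (by omega)
    rw [arm1, arm2, arm3]
  · -- b ≥ W: both sides are zero
    rw [show decide (b < W) = false by simp [hbW], Bool.and_false]
    have hl : (if 0 < i then cs.getD (i - 1) 0 else 0).testBit (b - 2) = false := by
      split
      · exact hcell _ _ (by omega)
      · simp
    have hc : (cs.getD i 0).testBit (b - 1) = false := hcell _ _ (by omega)
    have hr : (if i + 1 < L then cs.getD (i + 1) 0 else 0).testBit b = false := by
      split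
      · exact hcell _ _ (by omega)
      · simp
    rw [hl, hc, hr]
    simp

-- A's loop body, named
def fA (current : List Int) (i : Int) : Int :=
  PySem.Int.band ((30 : Int) >>>
    (PySem.Int.bor (PySem.Int.bor
      ((if i > 0 then PySem.List.pyGetD current (i - 1) 0 else 0) <<< (2 : Nat))
      ((PySem.List.pyGetD current i 0) <<< (1 : Nat)))
      (if i < PySem.List.len current - 1 then PySem.List.pyGetD current (i + 1) 0 else 0)).toNat) 1

-- A's output as a map over range
lemma ruleA_map (current : List Int) :
    rule_30_step current = (List.range current.length).map (fun (j : Nat) => fA current (j : Int)) := by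
  unfold rule_30_step
  change (PySem.List.pyRange 0 (PySem.List.len current) 1).foldl
    (fun acc i => acc ++ [fA current i]) [] = _
  rw [PySem.List.foldl_append_singleton_eq_map, List.nil_append, PySem.List.len_eq,
    PySem.List.pyRange_one, List.map_map]
  rw [show (((current.length : Int) - 0)).toNat = current.length by omega]
  apply List.map_congr_left
  intro j _
  show fA current ((0 : Int) + (j : Int)) = _
  rw [zero_add]

-- B's helpers, named (definitionally B's let-bound values)
def wB (current : List Int) : Nat :=
  (current.map (fun v => PySem.Int.bitLength v)).foldl max 0 + 3

def nB (current : List Int) : Int :=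
  current.foldl (fun m v => PySem.Int.bor (m <<< wB current) v) 0

def pB (current : List Int) : Int :=
  PySem.Int.bor (PySem.Int.bor (nB current >>> (wB current - 2)) (nB current <<< (1 : Nat)))
    (nB current <<< wB current)

lemma ruleB_map (current : List Int) (h : ¬ current = []) :
    rule_30_step_alt current = (List.range current.length).map (fun i =>
      PySem.Int.band ((30 : Int) >>>
        (PySem.Int.band (pB current >>> (wB current * (current.length - 1 - i)))
          (((1 : Int) <<< wB current) - 1)).toNat) 1) := by
  unfold rule_30_step_alt
  rw [if_neg h]
  rfl

-- A's per-cell value in Nat form, for rows of nonnegative cells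
lemma fA_nat (current : List Int) (hpre : ∀ c ∈ current, 0 ≤ c)
    (j : Nat) (hj : j < current.length) :
    fA current (j : Int)
      = ((((30 : Nat) >>>
          ((((if 0 < j then (current.map Int.toNat).getD (j - 1) 0 else 0) <<< 2) |||
            (((current.map Int.toNat).getD j 0) <<< 1)) |||
            (if j + 1 < current.length then (current.map Int.toNat).getD (j + 1) 0 else 0))) &&& 1 : Nat) : Int) := by
  have hgd : ∀ k, current.getD k 0 = (((current.map Int.toNat).getD k 0 : Nat) : Int) := by
    intro k
    by_cases hk : k < current.length
    · rw [List.getD_eq_getElem _ _ hk,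
        List.getD_eq_getElem _ _ (by simpa using hk), List.getElem_map]
      have := hpre _ (current.getElem_mem hk)
      omega
    · rw [List.getD_eq_default _ _ (by omega), List.getD_eq_default _ _ (by simp; omega)]
      rfl
  have e1 : (if (j : Int) > 0 then PySem.List.pyGetD current ((j : Int) - 1) 0 else 0)
      = (((if 0 < j then (current.map Int.toNat).getD (j - 1) 0 else 0) : Nat) : Int) := by
    by_cases h0 : 0 < j
    · rw [if_pos (show (j : Int) > 0 by exact_mod_cast h0), if_pos h0,
        show ((j : Int) - 1) = ((j - 1 : Nat) : Int) by omega, PySem.List.pyGetD_natCast, hgd]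
    · have hj0 : j = 0 := by omega
      subst hj0; simp
  have e2 : PySem.List.pyGetD current (j : Int) 0
      = ((((current.map Int.toNat).getD j 0) : Nat) : Int) := by
    rw [PySem.List.pyGetD_natCast, hgd]
  have e3 : (if (j : Int) < PySem.List.len current - 1
        then PySem.List.pyGetD current ((j : Int) + 1) 0 else 0)
      = (((if j + 1 < current.length then (current.map Int.toNat).getD (j + 1) 0 else 0) : Nat) : Int) := by
    rw [PySem.List.len_eq]
    by_cases h1 : j + 1 < current.length
    · rw [if_pos (show (j : Int) < (current.length : Int) - 1 by omega), if_pos h1,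
        show ((j : Int) + 1) = ((j + 1 : Nat) : Int) by push_cast; ring,
        PySem.List.pyGetD_natCast, hgd]
    · rw [if_neg (show ¬((j : Int) < (current.length : Int) - 1) by omega), if_neg h1]; rfl
  unfold fA
  rw [e1, e2, e3, shiftL_natCast, shiftL_natCast, PySem.Int.bor_natCast, PySem.Int.bor_natCast,
    Int.toNat_natCast, show (30 : Int) = ((30 : Nat) : Int) from rfl, shiftR_natCast,
    show (1 : Int) = ((1 : Nat) : Int) from rfl, PySem.Int.band_natCast]

-- ===== VERDICT (by name: the statement is the Claim_ definition above) =====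
theorem rule_30_step_spec : Claim_equal_rule_30_step := by
  intro current _ hpre
  unfold Spec_rule_30_step
  by_cases hnil : current = []
  · subst hnil; rfl
  rw [ruleA_map, ruleB_map current hnil]
  set cs : List Nat := current.map Int.toNat with hcsdef
  set W : Nat := wB current with hWdef
  have hWeq : W = (current.map (fun v => PySem.Int.bitLength v)).foldl max 0 + 3 := hWdef
  have hW3 : 3 ≤ W := by omega
  have hLcs : cs.length = current.length := by simp [hcsdef]
  have hmem : ∀ x ∈ cs, x < 2 ^ (W - 3) := by
    intro x hx
    obtain ⟨v, hv, rfl⟩ := List.mem_map.mp hx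
    have hbl : PySem.Int.bitLength v ≤ W - 3 := by
      have hle : PySem.Int.bitLength v ≤ (current.map (fun v => PySem.Int.bitLength v)).foldl max 0 :=
        le_foldl_max _ 0 _ (List.mem_map.mpr ⟨v, hv, rfl⟩)
      omega
    have hv0 : (0 : Int) ≤ v := hpre v hv
    have habs : v.toNat = v.natAbs := by omega
    calc v.toNat = v.natAbs := habs
      _ < 2 ^ PySem.Int.bitLength v := PySem.Int.lt_two_pow_bitLength v
      _ ≤ 2 ^ (W - 3) := Nat.pow_le_pow_right (by omega) hbl
  have hn : nB current = ((packW W cs : Nat) : Int) := by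
    unfold nB
    rw [show (0 : Int) = ((0 : Nat) : Int) from rfl, pack_int' current W 0 hpre]
    rw [packW, hcsdef, List.foldl_map]
  have hp : pB current
      = ((((packW W cs >>> (W - 2)) ||| (packW W cs <<< 1)) ||| (packW W cs <<< W) : Nat) : Int) := by
    unfold pB
    rw [hn, shiftR_natCast, shiftL_natCast, shiftL_natCast, PySem.Int.bor_natCast,
      PySem.Int.bor_natCast]
  apply List.map_congr_left
  intro i hi
  have hiL : i < current.length := List.mem_range.mp hi
  rw [fA_nat current hpre i hiL, hp, shiftR_natCast, one_shiftL_sub_one,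
    PySem.Int.band_natCast, Int.toNat_natCast, show (30 : Int) = ((30 : Nat) : Int) from rfl,
    shiftR_natCast, show (1 : Int) = ((1 : Nat) : Int) from rfl, PySem.Int.band_natCast]
  have hfield := field_eq W hW3 cs hmem i (by omega)
  rw [hLcs] at hfield
  rw [hfield]
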